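-- pv_equiv track=rewrite | github.com/MossGoblin/factorization | processor.py | filter_property_buckets
-- ===== SOURCE A (Python) =====
-- def filter_property_buckets(sorted_property_buckets: dict, cut_off_value: int):
--     trimmed_property_buckets = {}
--     for index, item in sorted_property_buckets.items():
--         trimmed_property_buckets[index] = item
--
--     filtered_property_buckets = []
--     counter = 1
--     while counter <= cut_off_value and len(trimmed_property_buckets) > 0:
--         item = next(iter(trimmed_property_buckets.items()))
--         filtered_property_buckets.extend(item[1])
--         trimmed_property_buckets.pop(item[0])
--         counter += 1
--
--     return filtered_property_buckets, trimmed_property_buckets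
-- ===== SOURCE B (Python) =====
-- def filter_property_buckets(sorted_property_buckets: dict, cut_off_value: int):
--     filtered_property_buckets = []
--     remainder = {}
--     for i, (key, value) in enumerate(sorted_property_buckets.items()):
--         if i < cut_off_value:
--             filtered_property_buckets.extend(value)
--         else:
--             remainder[key] = value
--     return filtered_property_buckets, remainder
-- ===== Notes on version B (the rewrite author's own statement) =====
-- stated objective: simpler
-- what changed: B replaces A's dict copy plus repeated next(iter())/pop while-loop with a single enumerate pass over the items that extends the result for the first cut_off_value buckets and collects the rest into a fresh remainder dict.
import Mathlib
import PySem

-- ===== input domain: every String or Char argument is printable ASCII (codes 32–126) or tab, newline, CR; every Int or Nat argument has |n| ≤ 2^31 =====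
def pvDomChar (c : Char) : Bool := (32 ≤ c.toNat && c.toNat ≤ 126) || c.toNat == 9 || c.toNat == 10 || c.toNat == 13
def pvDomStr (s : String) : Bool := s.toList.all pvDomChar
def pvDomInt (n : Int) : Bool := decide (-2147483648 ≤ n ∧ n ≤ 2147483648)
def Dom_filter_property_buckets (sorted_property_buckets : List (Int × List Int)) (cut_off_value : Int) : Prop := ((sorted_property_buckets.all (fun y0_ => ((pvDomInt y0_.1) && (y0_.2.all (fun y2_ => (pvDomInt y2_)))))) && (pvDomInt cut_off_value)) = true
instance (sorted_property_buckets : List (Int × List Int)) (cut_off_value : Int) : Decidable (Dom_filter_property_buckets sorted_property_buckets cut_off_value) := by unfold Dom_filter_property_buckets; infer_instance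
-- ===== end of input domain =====

-- B does one enumerate pass over the dict's items instead of A's dict copy + repeated next(iter())/pop loop; objective: simpler.

-- ===== PORT A =====
-- the while loop: each pass pops the first key of the dict, so `trimmed.size` iterations suffice;
-- the fuel argument only makes that same computation total.
def pvLoopA (fuel : Nat) (counter cut_off_value : Int) (filtered : List Int)
    (trimmed : PySem.Dict Int (List Int)) : List Int × List (Int × List Int) :=
  match fuel, trimmed.items with
  | fuel + 1, (k, v) :: _ =>
      if counter ≤ cut_off_value then
        pvLoopA fuel (counter + 1) cut_off_value (filtered ++ v) (trimmed.erase k)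
      else (filtered, trimmed.items)
  | _, _ => (filtered, trimmed.items)

def filter_property_buckets (sorted_property_buckets : List (Int × List Int)) (cut_off_value : Int) : List Int × (List (Int × List Int)) :=
  -- trimmed_property_buckets = {}; for index, item in …: trimmed[index] = item
  let trimmed := sorted_property_buckets.foldl (fun d p => d.insert p.1 p.2) PySem.Dict.empty
  pvLoopA trimmed.size 1 cut_off_value [] trimmed

-- ===== PORT B =====
-- state of B's single pass: (enumerate index i, filtered list, remainder dict-as-items;
-- remainder[key] = value always sees a fresh key of an insertion-ordered dict, i.e. appends)
def pvStepB (cut_off_value : Int) (st : Int × List Int × List (Int × List Int))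
    (p : Int × List Int) : Int × List Int × List (Int × List Int) :=
  if st.1 < cut_off_value then (st.1 + 1, st.2.1 ++ p.2, st.2.2)
  else (st.1 + 1, st.2.1, st.2.2 ++ [p])

def filter_property_buckets_alt (sorted_property_buckets : List (Int × List Int)) (cut_off_value : Int) : List Int × (List (Int × List Int)) :=
  let st := sorted_property_buckets.foldl (pvStepB cut_off_value) (0, [], [])
  (st.2.1, st.2.2)

-- ===== PRECONDITION & SPEC =====
-- Pre_ excludes association lists with duplicate keys: they do not faithfully represent the
-- Python dict argument (building the dict collapses them), so the ports' behaviour there is accidental.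
def Pre_filter_property_buckets (sorted_property_buckets : List (Int × List Int)) (cut_off_value : Int) : Prop :=
  (sorted_property_buckets.map Prod.fst).Nodup
instance (sorted_property_buckets : List (Int × List Int)) (cut_off_value : Int) : Decidable (Pre_filter_property_buckets sorted_property_buckets cut_off_value) := by unfold Pre_filter_property_buckets; infer_instance

def pvWitness_filter_property_buckets : (List (Int × List Int)) × Int := ([(2, [3, 4]), (5, [6])], 1)

def Spec_filter_property_buckets (sorted_property_buckets : List (Int × List Int)) (cut_off_value : Int) (out : List Int × (List (Int × List Int))) : Prop := out = filter_property_buckets_alt sorted_property_buckets cut_off_value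
instance (sorted_property_buckets : List (Int × List Int)) (cut_off_value : Int) (out : List Int × (List (Int × List Int))) : Decidable (Spec_filter_property_buckets sorted_property_buckets cut_off_value out) := by unfold Spec_filter_property_buckets; infer_instance

-- ===== CLAIM (what is proved, stated in full; the proofs are below) =====
def Claim_equal_filter_property_buckets : Prop := ∀ (sorted_property_buckets : List (Int × List Int)) (cut_off_value : Int), Dom_filter_property_buckets sorted_property_buckets cut_off_value → Pre_filter_property_buckets sorted_property_buckets cut_off_value → Spec_filter_property_buckets sorted_property_buckets cut_off_value (filter_property_buckets sorted_property_buckets cut_off_value)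

-- ===== LEMMAS AND PROOFS =====

theorem pv_erase_mk_cons (k : Int) (v : List Int) (rest : List (Int × List Int))
    (h : k ∉ rest.map Prod.fst) :
    (PySem.Dict.mk ((k, v) :: rest)).erase k = PySem.Dict.mk rest := by
  simp only [PySem.Dict.erase]
  congr 1
  simp only [List.filter_cons, beq_self_eq_true, Bool.not_true, Bool.false_eq_true,
    if_false, List.filter_eq_self]
  intro a hab
  simp only [Bool.not_eq_true', beq_eq_false_iff_ne, ne_eq]
  intro hk
  exact h (List.mem_map.2 ⟨a, hab, hk⟩)

theorem pv_foldlB_else (cut_off_value : Int) (l : List (Int × List Int))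
    (i : Int) (filtered : List Int) (rem : List (Int × List Int)) (h : cut_off_value ≤ i) :
    l.foldl (pvStepB cut_off_value) (i, filtered, rem)
      = (i + l.length, filtered, rem ++ l) := by
  induction l generalizing i rem with
  | nil => simp
  | cons p l ih =>
      simp only [List.foldl_cons, pvStepB, if_neg (by omega : ¬ i < cut_off_value)]
      rw [ih (i + 1) (rem ++ [p]) (by omega)]
      refine Prod.ext (by simp only [List.length_cons]; push_cast; ring) (Prod.ext rfl (by simp))

theorem pv_loop_eq (l : List (Int × List Int)) (cut_off_value i : Int) (filtered : List Int)
    (h : (l.map Prod.fst).Nodup) :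
    pvLoopA l.length (i + 1) cut_off_value filtered (PySem.Dict.mk l)
      = (let st := l.foldl (pvStepB cut_off_value) (i, filtered, []); (st.2.1, st.2.2)) := by
  induction l generalizing i filtered with
  | nil => simp [pvLoopA]
  | cons p l ih =>
      obtain ⟨k, v⟩ := p
      simp only [List.map_cons, List.nodup_cons] at h
      by_cases hc : i + 1 ≤ cut_off_value
      · have : pvLoopA (l.length + 1) (i + 1) cut_off_value filtered (PySem.Dict.mk ((k, v) :: l))
            = pvLoopA l.length (i + 1 + 1) cut_off_value (filtered ++ v)
                ((PySem.Dict.mk ((k, v) :: l)).erase k) := by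
          simp [pvLoopA, hc]
        rw [List.length_cons, this, pv_erase_mk_cons k v l h.1, ih (i + 1) (filtered ++ v) h.2]
        simp only [List.foldl_cons, pvStepB, if_pos (by omega : i < cut_off_value)]
      · have hl : pvLoopA (l.length + 1) (i + 1) cut_off_value filtered (PySem.Dict.mk ((k, v) :: l))
            = (filtered, (k, v) :: l) := by
          simp [pvLoopA, hc]
        rw [List.length_cons, hl]
        simp only [List.foldl_cons, pvStepB, if_neg (by omega : ¬ i < cut_off_value)]
        rw [pv_foldlB_else cut_off_value l (i + 1) filtered ([] ++ [(k, v)]) (by omega)]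
        simp

theorem pv_trimmed_eq (sorted_property_buckets : List (Int × List Int))
    (h : (sorted_property_buckets.map Prod.fst).Nodup) :
    sorted_property_buckets.foldl (fun d p => d.insert p.1 p.2) PySem.Dict.empty
      = PySem.Dict.mk sorted_property_buckets := by
  apply PySem.Dict.ext
  rw [show (fun (d : PySem.Dict Int (List Int)) (p : Int × List Int) => d.insert p.1 p.2)
      = fun d p => d.insert (Prod.fst p) (Prod.snd p) from rfl,
    PySem.Dict.items_foldl_insert_fresh sorted_property_buckets Prod.fst Prod.snd PySem.Dict.empty
      (fun a _ => PySem.Dict.contains_empty a.1) h]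
  simp [PySem.Dict.empty]

-- ===== VERDICT (by name: the statement is the Claim_ definition above) =====
theorem filter_property_buckets_spec : Claim_equal_filter_property_buckets := by
  intro sb cut _ hpre
  unfold Spec_filter_property_buckets
  simp only [filter_property_buckets, filter_property_buckets_alt]
  rw [pv_trimmed_eq sb hpre]
  have := pv_loop_eq sb cut 0 [] hpre
  simpa [PySem.Dict.size] using this
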